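-- pv_equiv track=rewrite | github.com/yingyuankai/AiSpace | aispace/models/info_extract/bento_services/bert_for_ner_with_title_status_service.py | _align_raw_text
-- ===== SOURCE A (Python) =====
-- def _align_raw_text(tags, raw_tokens, align_mapping):
--     new_tokens, new_tags = [], []
--     i, j = 0, 0
--     while i <= j < min(len(tags), len(raw_tokens)):
--         if align_mapping[i] == align_mapping[j]:
--             j += 1
--         else:
--             new_tokens.append(raw_tokens[align_mapping[i]])
--             new_tags.append(tags[i])
--             i = j
--     return new_tokens, new_tags
-- ===== SOURCE B (Python) =====
-- def _align_raw_text(tags, raw_tokens, align_mapping):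
--     n = min(len(tags), len(raw_tokens))
--     starts = [0] + [k for k in range(1, n) if align_mapping[k] != align_mapping[k - 1]]
--     emit = starts[:-1]  # A never emits the final run
--     return ([raw_tokens[align_mapping[s]] for s in emit],
--             [tags[s] for s in emit])
-- ===== Notes on version B (the rewrite author's own statement) =====
-- stated objective: simpler
-- what changed: Replaces the fused two-pointer while-loop with mutable run state by a two-pass decomposition: first compute the start indices of runs of equal align_mapping values with a comprehension, then emit token/tag for every start except the last.
import Mathlib
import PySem

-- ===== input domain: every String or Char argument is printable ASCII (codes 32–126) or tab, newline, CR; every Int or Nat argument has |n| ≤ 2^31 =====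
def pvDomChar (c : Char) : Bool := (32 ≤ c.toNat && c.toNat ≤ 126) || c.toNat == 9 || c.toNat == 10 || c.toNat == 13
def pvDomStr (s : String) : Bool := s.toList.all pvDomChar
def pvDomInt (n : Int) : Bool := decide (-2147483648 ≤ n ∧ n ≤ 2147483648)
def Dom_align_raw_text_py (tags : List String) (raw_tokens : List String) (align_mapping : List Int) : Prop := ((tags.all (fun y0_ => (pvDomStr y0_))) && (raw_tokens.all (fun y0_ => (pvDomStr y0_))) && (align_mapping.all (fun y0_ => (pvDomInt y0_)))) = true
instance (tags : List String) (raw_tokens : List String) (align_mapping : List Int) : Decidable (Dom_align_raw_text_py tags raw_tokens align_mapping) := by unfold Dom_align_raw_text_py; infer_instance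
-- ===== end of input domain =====

-- B replaces A's fused two-pointer while-loop by a two-pass decomposition (collect run
-- start indices, then emit token/tag for each start but the last); same cost, simpler.

-- ===== PORT A =====
-- the while loop: state (i, j, new_tokens, new_tags); out-of-range accesses (where the
-- Python raises) are totalized with getD defaults and excluded by Pre_ below
def loopA (tags raw_tokens : List String) (am : List Int) (n : Nat) :
    Nat → Nat → Nat → List String → List String → List String × List String
  | 0, _, _, tok, tg => (tok, tg)  -- fuel guard only; never reached from align_raw_text_py
  | fuel + 1, i, j, tok, tg =>
    if i ≤ j ∧ j < n then
      if PySem.List.pyGet? am (i : Int) = PySem.List.pyGet? am (j : Int) then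
        loopA tags raw_tokens am n fuel i (j + 1) tok tg
      else
        loopA tags raw_tokens am n fuel j j
          (tok ++ [(PySem.List.pyGet? raw_tokens ((PySem.List.pyGet? am (i : Int)).getD 0)).getD ""])
          (tg ++ [(PySem.List.pyGet? tags (i : Int)).getD ""])
    else (tok, tg)

def align_raw_text_py (tags : List String) (raw_tokens : List String) (align_mapping : List Int) : List String × List String :=
  loopA tags raw_tokens align_mapping (min tags.length raw_tokens.length)
    (2 * min tags.length raw_tokens.length + 1) 0 0 [] []

-- ===== PORT B =====
def align_raw_text_py_alt (tags : List String) (raw_tokens : List String) (align_mapping : List Int) : List String × List String :=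
  let n := min tags.length raw_tokens.length
  -- starts = [0] + [k for k in range(1, n) if align_mapping[k] != align_mapping[k-1]]
  let starts : List Nat :=
    0 :: (List.range' 1 (n - 1)).filter
      (fun (k : Nat) => PySem.List.pyGet? align_mapping (k : Int) ≠ PySem.List.pyGet? align_mapping ((k : Int) - 1))
  let emit := starts.dropLast   -- starts[:-1]
  (emit.map (fun (s : Nat) => (PySem.List.pyGet? raw_tokens ((PySem.List.pyGet? align_mapping (s : Int)).getD 0)).getD ""),
   emit.map (fun (s : Nat) => (PySem.List.pyGet? tags (s : Int)).getD ""))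

-- ===== PRECONDITION & SPEC =====
-- Pre_ = exactly the inputs on which the Python A returns (no IndexError): align_mapping
-- covers all scanned positions, and at every emitted run start the mapped raw_tokens
-- index is in range (Python negative indexing allowed).
-- Bool form of the condition (kernel-evaluable); k ranges over scanned positions,
-- run starts are k = 0 or a change from k-1, emitted iff some later position differs
def preCheck (tags : List String) (raw_tokens : List String) (align_mapping : List Int) : Bool :=
  let n := min tags.length raw_tokens.length
  decide (n ≤ align_mapping.length) &&
  (List.range n).all (fun k =>
    !((k == 0 || !(PySem.List.pyGet? align_mapping (k : Int) == PySem.List.pyGet? align_mapping ((k : Int) - 1))) &&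
      (List.range n).any (fun m =>
        decide (k < m) && !(PySem.List.pyGet? align_mapping (m : Int) == PySem.List.pyGet? align_mapping (k : Int)))) ||
    decide (PySem.Raise.InRange raw_tokens.length ((PySem.List.pyGet? align_mapping (k : Int)).getD 0)))

def Pre_align_raw_text_py (tags : List String) (raw_tokens : List String) (align_mapping : List Int) : Prop :=
  preCheck tags raw_tokens align_mapping = true
instance (tags : List String) (raw_tokens : List String) (align_mapping : List Int) : Decidable (Pre_align_raw_text_py tags raw_tokens align_mapping) := by unfold Pre_align_raw_text_py; infer_instance

def pvWitness_align_raw_text_py : List String × List String × List Int := (["B", "O"], ["x", "y"], [0, 1])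

def Spec_align_raw_text_py (tags : List String) (raw_tokens : List String) (align_mapping : List Int) (out : List String × List String) : Prop := out = align_raw_text_py_alt tags raw_tokens align_mapping
instance (tags : List String) (raw_tokens : List String) (align_mapping : List Int) (out : List String × List String) : Decidable (Spec_align_raw_text_py tags raw_tokens align_mapping out) := by unfold Spec_align_raw_text_py; infer_instance

-- ===== CLAIM (what is proved, stated in full; the proofs are below) =====
def Claim_equal_align_raw_text_py : Prop := ∀ (tags : List String) (raw_tokens : List String) (align_mapping : List Int), Dom_align_raw_text_py tags raw_tokens align_mapping → Pre_align_raw_text_py tags raw_tokens align_mapping → Spec_align_raw_text_py tags raw_tokens align_mapping (align_raw_text_py tags raw_tokens align_mapping)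

-- ===== LEMMAS AND PROOFS =====

-- first index ≥ j (below n) whose align value differs from the value at i, else n
def nextd (am : List Int) (n : Nat) (i j : Nat) : Nat :=
  if hcond : j < n then
    if PySem.List.pyGet? am (j : Int) = PySem.List.pyGet? am (i : Int) then nextd am n i (j + 1) else j
  else n
termination_by n - j

theorem nextd_ge (am : List Int) (n i : Nat) : ∀ j, j ≤ n → j ≤ nextd am n i j := by
  intro j
  induction j using nextd.induct (am := am) (n := n) (i := i) with
  | case1 j hj heq ih =>
      intro _; rw [nextd, dif_pos hj, if_pos heq]
      exact Nat.le_trans (Nat.le_succ j) (ih hj)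
  | case2 j hj heq =>
      intro _; rw [nextd, dif_pos hj, if_neg heq]
  | case3 j hj =>
      intro h; rw [nextd, dif_neg hj]; exact h

theorem nextd_le (am : List Int) (n i : Nat) : ∀ j, nextd am n i j ≤ n := by
  intro j
  induction j using nextd.induct (am := am) (n := n) (i := i) with
  | case1 j hj heq ih => rw [nextd, dif_pos hj, if_pos heq]; exact ih
  | case2 j hj heq => rw [nextd, dif_pos hj, if_neg heq]; omega
  | case3 j hj => rw [nextd, dif_neg hj]

theorem nextd_run (am : List Int) (n i : Nat) : ∀ j, j ≤ n →
    (∀ k, j ≤ k → k < nextd am n i j → PySem.List.pyGet? am (k : Int) = PySem.List.pyGet? am (i : Int)) := by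
  intro j
  induction j using nextd.induct (am := am) (n := n) (i := i) with
  | case1 j hj heq ih =>
      intro _ k hk1 hk2
      rw [nextd, dif_pos hj, if_pos heq] at hk2
      rcases Nat.eq_or_lt_of_le hk1 with h | h
      · rw [← h]; exact heq
      · exact ih hj k h hk2
  | case2 j hj heq =>
      intro _ k hk1 hk2
      rw [nextd, dif_pos hj, if_neg heq] at hk2; omega
  | case3 j hj =>
      intro hjn k hk1 hk2
      rw [nextd, dif_neg hj] at hk2; omega

theorem nextd_diff (am : List Int) (n i : Nat) : ∀ j, nextd am n i j < n →
    PySem.List.pyGet? am ((nextd am n i j : Nat) : Int) ≠ PySem.List.pyGet? am (i : Int) := by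
  intro j
  induction j using nextd.induct (am := am) (n := n) (i := i) with
  | case1 j hj heq ih =>
      rw [nextd, dif_pos hj, if_pos heq]; exact ih
  | case2 j hj heq =>
      rw [nextd, dif_pos hj, if_neg heq]; intro _; exact heq
  | case3 j hj =>
      rw [nextd, dif_neg hj]; omega

-- nextd is determined by its specification
theorem nextd_eq (am : List Int) (n i : Nat) (j' : Nat) (hj'n : j' ≤ n)
    (hstop : j' < n → PySem.List.pyGet? am ((j' : Nat) : Int) ≠ PySem.List.pyGet? am (i : Int)) :
    ∀ j, j ≤ j' →
    (∀ k, j ≤ k → k < j' → PySem.List.pyGet? am (k : Int) = PySem.List.pyGet? am (i : Int)) →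
    nextd am n i j = j' := by
  intro j
  induction j using nextd.induct (am := am) (n := n) (i := i) with
  | case1 j hj heq ih =>
      intro hjj hrun
      rw [nextd, dif_pos hj, if_pos heq]
      have hjne : j ≠ j' := by
        intro e; subst e
        exact hstop hj heq
      exact ih (by omega) (fun k hk1 hk2 => hrun k (by omega) hk2)
  | case2 j hj heq =>
      intro hjj hrun
      rw [nextd, dif_pos hj, if_neg heq]
      rcases Nat.eq_or_lt_of_le hjj with h | h
      · exact h.symm ▸ rfl
      · exact absurd (hrun j (Nat.le_refl j) h) heq
  | case3 j hj =>
      intro hjj hrun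
      rw [nextd, dif_neg hj]; omega

-- the recursive specification: output of the algorithm from run start i
def runS (tags raw_tokens : List String) (am : List Int) (n : Nat) (i : Nat) : List String × List String :=
  if hi : i < n then
    let j := nextd am n i (i + 1)
    if hj : j < n then
      ((PySem.List.pyGet? raw_tokens ((PySem.List.pyGet? am (i : Int)).getD 0)).getD "" :: (runS tags raw_tokens am n j).1,
       (PySem.List.pyGet? tags (i : Int)).getD "" :: (runS tags raw_tokens am n j).2)
    else ([], [])
  else ([], [])
termination_by n - i
decreasing_by
  have := nextd_ge am n i (i + 1) (by omega)
  omega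

-- A's loop computes runS (fuel large enough for the 2(n-j)+(j-i) measure)
theorem loopA_eq (tags raw_tokens : List String) (am : List Int) (n : Nat) :
    ∀ fuel i j tok tg, i ≤ j → j ≤ n → 2 * (n - j) + (j - i) < fuel →
    (∀ k, i ≤ k → k < j → PySem.List.pyGet? am (k : Int) = PySem.List.pyGet? am (i : Int)) →
    loopA tags raw_tokens am n fuel i j tok tg =
      (tok ++ (runS tags raw_tokens am n i).1, tg ++ (runS tags raw_tokens am n i).2) := by
  intro fuel
  induction fuel with
  | zero => intro i j tok tg _ _ hf _; omega
  | succ fuel ih =>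
    intro i j tok tg hij hjn hf hrun
    rw [loopA]
    by_cases hcond : i ≤ j ∧ j < n
    · rw [if_pos hcond]
      by_cases heq : PySem.List.pyGet? am (i : Int) = PySem.List.pyGet? am (j : Int)
      · rw [if_pos heq]
        refine ih i (j + 1) tok tg (by omega) (by omega) (by omega) ?_
        intro k hk1 hk2
        rcases Nat.lt_or_ge k j with h' | h'
        · exact hrun k hk1 h'
        · have : k = j := by omega
          rw [this]; exact heq.symm
      · rw [if_neg heq]
        have hiltj : i < j := by
          rcases Nat.eq_or_lt_of_le hij with e | e
          · exact absurd (by rw [e]) heq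
          · exact e
        have hnd : nextd am n i (i + 1) = j :=
          nextd_eq am n i j hjn (fun _ => fun e => heq e.symm) (i + 1) (by omega)
            (fun k hk1 hk2 => hrun k (by omega) hk2)
        rw [ih j j _ _ (Nat.le_refl j) hjn (by omega) (fun k hk1 hk2 => by omega)]
        have hi : i < n := by omega
        conv_rhs => rw [runS]
        rw [dif_pos hi]
        simp only [hnd, dif_pos hcond.2]
        simp
    · rw [if_neg hcond]
      have hjeq : j = n := by omega
      by_cases hi : i < n
      · have hnd : nextd am n i (i + 1) = n :=
          nextd_eq am n i n (Nat.le_refl n) (by omega) (i + 1) (by omega)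
            (fun k hk1 hk2 => hrun k (by omega) (by omega))
        rw [runS, dif_pos hi]
        simp only [hnd]
        rw [dif_neg (lt_irrefl n)]
        simp
      · rw [runS, dif_neg hi]; simp

-- B's filtered tail of run starts, from position j
theorem filter_starts_eq (am : List Int) (n : Nat) (i : Nat) (hi : i < n) :
    (List.range' (i + 1) (n - (i + 1))).filter
      (fun (k : Nat) => decide (PySem.List.pyGet? am (k : Int) ≠ PySem.List.pyGet? am ((k : Int) - 1))) =
    (if h : nextd am n i (i + 1) < n then
      nextd am n i (i + 1) ::
        (List.range' (nextd am n i (i + 1) + 1) (n - (nextd am n i (i + 1) + 1))).filter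
          (fun (k : Nat) => decide (PySem.List.pyGet? am (k : Int) ≠ PySem.List.pyGet? am ((k : Int) - 1)))
     else []) := by
  have hge := nextd_ge am n i (i + 1) (by omega)
  have hle := nextd_le am n i (i + 1)
  have hrun := nextd_run am n i (i + 1) (by omega)
  set j := nextd am n i (i + 1) with hj
  -- split the range at j
  have hsplit : List.range' (i + 1) (n - (i + 1)) =
      List.range' (i + 1) (j - (i + 1)) ++ List.range' j (n - j) := by
    rw [show n - (i + 1) = (j - (i + 1)) + (n - j) by omega]
    rw [← List.range'_append (s := i + 1) (m := j - (i + 1)) (n := n - j) (step := 1)]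
    rw [show i + 1 + 1 * (j - (i + 1)) = j by omega]
  rw [hsplit, List.filter_append]
  -- the first part filters to []
  have h1 : (List.range' (i + 1) (j - (i + 1))).filter
      (fun (k : Nat) => decide (PySem.List.pyGet? am (k : Int) ≠ PySem.List.pyGet? am ((k : Int) - 1))) = [] := by
    rw [List.filter_eq_nil_iff]
    intro k hk
    rw [List.mem_range'] at hk
    obtain ⟨m, hm, hkm⟩ := hk
    have hk1 : i + 1 ≤ k := by omega
    have hk2 : k < j := by omega
    have hprev : PySem.List.pyGet? am ((k : Int) - 1) = PySem.List.pyGet? am (i : Int) := by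
      have : ((k : Int) - 1) = ((k - 1 : Nat) : Int) := by omega
      rw [this]
      rcases Nat.eq_or_lt_of_le hk1 with e | e
      · rw [show k - 1 = i by omega]
      · exact hrun (k - 1) (by omega) (by omega)
    have hcur : PySem.List.pyGet? am (k : Int) = PySem.List.pyGet? am (i : Int) :=
      hrun k hk1 hk2
    simp [hcur, hprev]
  rw [h1, List.nil_append]
  by_cases h : j < n
  · rw [dif_pos h]
    have hrange : List.range' j (n - j) = j :: List.range' (j + 1) (n - (j + 1)) := by
      rw [show n - j = (n - (j + 1)) + 1 by omega, List.range'_succ]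
    rw [hrange, List.filter_cons]
    have hdiff := nextd_diff am n i (i + 1) h
    rw [← hj] at hdiff
    have hprev : PySem.List.pyGet? am ((j : Int) - 1) = PySem.List.pyGet? am (i : Int) := by
      have : ((j : Int) - 1) = ((j - 1 : Nat) : Int) := by omega
      rw [this]
      rcases Nat.eq_or_lt_of_le hge with e | e
      · rw [show j - 1 = i by omega]
      · exact hrun (j - 1) (by omega) (by omega)
    have hpj : PySem.List.pyGet? am (j : Int) ≠ PySem.List.pyGet? am ((j : Int) - 1) := by
      rw [hprev]; exact hdiff
    rw [if_pos (decide_eq_true hpj)]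
  · rw [dif_neg h]
    have : n - j = 0 := by omega
    rw [this]
    simp
-- B's two maps over the dropLast of the starts chain compute runS
theorem B_eq_runS (tags raw_tokens : List String) (am : List Int) (n : Nat) :
    ∀ i, i < n →
    (((i :: (List.range' (i + 1) (n - (i + 1))).filter
        (fun (k : Nat) => decide (PySem.List.pyGet? am (k : Int) ≠ PySem.List.pyGet? am ((k : Int) - 1)))).dropLast.map
        (fun (s : Nat) => (PySem.List.pyGet? raw_tokens ((PySem.List.pyGet? am (s : Int)).getD 0)).getD ""),
      (i :: (List.range' (i + 1) (n - (i + 1))).filter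
        (fun (k : Nat) => decide (PySem.List.pyGet? am (k : Int) ≠ PySem.List.pyGet? am ((k : Int) - 1)))).dropLast.map
        (fun (s : Nat) => (PySem.List.pyGet? tags (s : Int)).getD "")) =
      runS tags raw_tokens am n i) := by
  intro i
  induction i using runS.induct (am := am) (n := n) with
  | case1 i hi j hj ih =>
      intro _
      rw [filter_starts_eq am n i hi, dif_pos hj]
      have hih := ih hj
      conv_rhs => rw [runS]
      simp only [dif_pos hi, dif_pos hj]
      rw [← hih]
      simp [List.dropLast]
      rw [if_pos (show nextd am n i (i + 1) < n from hj)]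
  | case2 i hi j hj =>
      intro _
      rw [filter_starts_eq am n i hi, dif_neg hj]
      conv_rhs => rw [runS]
      simp only [dif_pos hi, dif_neg hj]
      rw [dif_neg (show ¬ nextd am n i (i + 1) < n from hj)]
      simp
  | case3 i hi =>
      intro h; omega

-- ===== VERDICT (by name: the statement is the Claim_ definition above) =====
theorem align_raw_text_py_spec : Claim_equal_align_raw_text_py := by
  intro tags raw_tokens am _ _
  unfold Spec_align_raw_text_py align_raw_text_py align_raw_text_py_alt
  set n := min tags.length raw_tokens.length with hn
  rw [loopA_eq tags raw_tokens am n (2 * n + 1) 0 0 [] [] (Nat.le_refl 0) (Nat.zero_le n) (by omega) (by omega)]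
  simp only [List.nil_append]
  by_cases h0 : 0 < n
  · have := B_eq_runS tags raw_tokens am n 0 h0
    simp only [Nat.cast_zero] at this ⊢
    rw [show n - (0 + 1) = n - 1 by omega] at this
    rw [← this]
  · have hn0 : n = 0 := by omega
    rw [runS, dif_neg (by omega)]
    simp [hn0]
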